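-- pv_equiv track=rewrite | github.com/schurmann/eitotnon41 | HA2/b2.py | separate_disjoint_batches
-- ===== SOURCE A (Python) =====
-- def disjoint(b1:set, b2:set) -> bool:
--     b =  len(b1.intersection(b2)) == 0
--     return b
--
-- def joint_with(b:set, others:list) -> list:
--     return [o for o in others if not disjoint(b, o)]
--
-- def separate_disjoint_batches(batchsets: list, m: int):
--     disjoint_indices = []
--     # for i in range(0, len(batchsets)):
--     #     for j in range(i + 1, len(batchsets)):
--     #         if disjoint(batchsets[i], batchsets[j]):
--     #            break
--     #     disjoint.append(i)
--     for i, batch in enumerate(batchsets):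
--         if len(joint_with(batch, [batchsets[i] for i in disjoint_indices])) == 0:
--             disjoint_indices.append(i)
--             if len(disjoint_indices) == m:
--                 break
--     disjoint_batches = []
--     joint_batches = []
--     for i, b in enumerate(batchsets):
--         if i in disjoint_indices:
--             disjoint_batches.append(b)
--         else:
--             joint_batches.append(b)
--     return disjoint_batches, joint_batches
-- ===== SOURCE B (Python) =====
-- def separate_disjoint_batches(batchsets: list, m: int):
--     # One pass: keep the running union of the selected batches; a single
--     # isdisjoint test against it replaces A's rescan of every selected batch,
--     # and the partition is built in the same pass instead of a second loop.
--     taken = set()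
--     done = False
--     disjoint_batches = []
--     joint_batches = []
--     for b in batchsets:
--         if not done and taken.isdisjoint(b):
--             disjoint_batches.append(b)
--             taken |= b
--             if len(disjoint_batches) == m:
--                 done = True
--         else:
--             joint_batches.append(b)
--     return disjoint_batches, joint_batches
-- ===== Notes on version B (the rewrite author's own statement) =====
-- stated objective: faster
-- what changed: Single pass that maintains the running union of selected batches (one set-disjointness test per batch) and builds both output lists in the same loop, instead of rebuilding and rescanning the list of selected batches for every candidate and then partitioning in a second index-membership loop.
import Mathlib
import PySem

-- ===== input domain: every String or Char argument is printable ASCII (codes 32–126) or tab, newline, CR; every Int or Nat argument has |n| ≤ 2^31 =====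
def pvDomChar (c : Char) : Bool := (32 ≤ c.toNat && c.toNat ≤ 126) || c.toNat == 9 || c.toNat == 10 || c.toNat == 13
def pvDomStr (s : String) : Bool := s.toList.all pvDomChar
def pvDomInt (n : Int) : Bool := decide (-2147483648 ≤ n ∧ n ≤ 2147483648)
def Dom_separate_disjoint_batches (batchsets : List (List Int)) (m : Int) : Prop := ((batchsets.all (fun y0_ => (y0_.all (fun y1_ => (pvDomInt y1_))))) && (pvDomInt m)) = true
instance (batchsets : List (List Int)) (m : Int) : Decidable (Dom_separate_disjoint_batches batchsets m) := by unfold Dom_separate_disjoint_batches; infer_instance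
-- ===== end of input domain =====

-- B replaces A's per-candidate rescan of all selected batches (and its second
-- partition loop) by one pass with a running union set; objective: faster.

-- ===== PORT A =====
def pvDisjoint (b1 b2 : List Int) : Bool :=
  (PySem.Set.inter b1 b2).length == 0

def pvJointWith (b : List Int) (others : List (List Int)) : List (List Int) :=
  others.filter (fun o => !(pvDisjoint b o))

-- first loop of A: greedy selection of indices, with the 'break' at len == m
def pvSelect (batchsets : List (List Int)) (m : Int) :
    List (Int × List Int) → List Int → List Int
  | [], acc => acc
  | (i, batch) :: rest, acc =>
    if (pvJointWith batch (acc.map (fun j => PySem.List.pyGetD batchsets j []))).length == 0 then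
      if (((acc ++ [i]).length : Int) == m) then acc ++ [i]
      else pvSelect batchsets m rest (acc ++ [i])
    else pvSelect batchsets m rest acc

def separate_disjoint_batches (batchsets : List (List Int)) (m : Int) :
    List (List Int) × List (List Int) :=
  let disjoint_indices := pvSelect batchsets m (PySem.List.enumerate batchsets) []
  (PySem.List.enumerate batchsets).foldl
    (fun p ib =>
      if disjoint_indices.contains ib.1 then (p.1 ++ [ib.2], p.2)
      else (p.1, p.2 ++ [ib.2]))
    ([], [])

-- ===== PORT B =====
def pvLoopB (m : Int) :
    List (List Int) → PySem.Set Int → Bool → List (List Int) → List (List Int) →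
    List (List Int) × List (List Int)
  | [], _, _, dis, joint => (dis, joint)
  | b :: rest, taken, done, dis, joint =>
    if !done && PySem.Set.isdisjoint taken b then
      pvLoopB m rest (PySem.Set.union taken b)
        (((dis ++ [b]).length : Int) == m) (dis ++ [b]) joint
    else pvLoopB m rest taken done dis (joint ++ [b])

def separate_disjoint_batches_alt (batchsets : List (List Int)) (m : Int) :
    List (List Int) × List (List Int) :=
  pvLoopB m batchsets PySem.Set.empty false [] []

-- ===== PRECONDITION & SPEC =====
def Spec_separate_disjoint_batches (batchsets : List (List Int)) (m : Int) (out : List (List Int) × List (List Int)) : Prop := out = separate_disjoint_batches_alt batchsets m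
instance (batchsets : List (List Int)) (m : Int) (out : List (List Int) × List (List Int)) : Decidable (Spec_separate_disjoint_batches batchsets m out) := by unfold Spec_separate_disjoint_batches; infer_instance

-- ===== CLAIM (what is proved, stated in full; the proofs are below) =====
def Claim_equal_separate_disjoint_batches : Prop := ∀ (batchsets : List (List Int)) (m : Int), Dom_separate_disjoint_batches batchsets m → Spec_separate_disjoint_batches batchsets m (separate_disjoint_batches batchsets m)

-- ===== LEMMAS AND PROOFS =====

-- A's second loop, as a named fold for the proofs
def pvPart (idxs : List Int) (pairs : List (Int × List Int))
    (st : List (List Int) × List (List Int)) : List (List Int) × List (List Int) :=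
  pairs.foldl
    (fun p ib =>
      if idxs.contains ib.1 then (p.1 ++ [ib.2], p.2)
      else (p.1, p.2 ++ [ib.2]))
    st

theorem pvLoopB_done (m : Int) (suf : List (List Int)) (taken : PySem.Set Int)
    (dis joint : List (List Int)) :
    pvLoopB m suf taken true dis joint = (dis, joint ++ suf) := by
  induction suf generalizing joint with
  | nil => simp [pvLoopB]
  | cons b rest ih => simp [pvLoopB, ih]

theorem pvPart_none (idxs : List Int) (pairs : List (Int × List Int))
    (d j : List (List Int)) (h : ∀ p ∈ pairs, idxs.contains p.1 = false) :
    pvPart idxs pairs (d, j) = (d, j ++ pairs.map (·.2)) := by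
  induction pairs generalizing j with
  | nil => simp [pvPart]
  | cons p rest ih =>
    have hp := h p (by simp)
    have ih' := ih (j ++ [p.2]) (fun q hq => h q (by simp [hq]))
    simp only [pvPart, List.foldl_cons, hp] at ih' ⊢
    simp only [Bool.false_eq_true, if_false]
    rw [ih']
    simp

theorem pvCheck_iff (b : List Int) (dis : List (List Int)) (taken : PySem.Set Int)
    (htaken : ∀ x : Int, x ∈ taken ↔ ∃ o ∈ dis, x ∈ o) :
    ((pvJointWith b dis).length == 0) = PySem.Set.isdisjoint taken b := by
  rw [Bool.eq_iff_iff]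
  constructor
  · intro h
    rw [PySem.Set.isdisjoint_iff taken b]
    intro x hx hxb
    rcases (htaken x).1 hx with ⟨o, ho, hxo⟩
    have : pvDisjoint b o = true := by
      have h0 : (pvJointWith b dis).length = 0 := by
        simpa using h
      have : pvJointWith b dis = [] := List.eq_nil_of_length_eq_zero h0
      have := List.filter_eq_nil_iff.1 this o ho
      simpa using this
    have hinter : (PySem.Set.inter b o).length = 0 := by
      simpa [pvDisjoint] using this
    have : x ∈ PySem.Set.inter b o := (PySem.Set.mem_inter b o x).2 ⟨hxb, hxo⟩
    rw [List.eq_nil_of_length_eq_zero hinter] at this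
    simp at this
  · intro h
    have hdisj := (PySem.Set.isdisjoint_iff taken b).1 h
    have : pvJointWith b dis = [] := by
      apply List.filter_eq_nil_iff.2
      intro o ho
      simp only [Bool.not_eq_true', Bool.not_eq_false]
      have : PySem.Set.inter b o = [] := by
        apply List.eq_nil_iff_forall_not_mem.2
        intro x hx
        rcases (PySem.Set.mem_inter b o x).1 hx with ⟨hxb, hxo⟩
        exact hdisj x ((htaken x).2 ⟨o, ho, hxo⟩) hxb
      simp [pvDisjoint, this]
    simp [this]

theorem pvMain (batchsets : List (List Int)) (m : Int) :
    ∀ (suf pre : List (List Int)) (acc : List Int) (taken : PySem.Set Int)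
      (dis joint : List (List Int)),
    batchsets = pre ++ suf →
    (∀ j ∈ acc, 0 ≤ j ∧ j < (pre.length : Int)) →
    dis = acc.map (fun j => PySem.List.pyGetD batchsets j []) →
    (∀ x : Int, x ∈ taken ↔ ∃ o ∈ dis, x ∈ o) →
    (∃ extra, pvSelect batchsets m (PySem.List.enumerate suf (pre.length : Int)) acc
        = acc ++ extra ∧ ∀ j ∈ extra, (pre.length : Int) ≤ j)
    ∧ pvPart (pvSelect batchsets m (PySem.List.enumerate suf (pre.length : Int)) acc)
        (PySem.List.enumerate suf (pre.length : Int)) (dis, joint)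
      = pvLoopB m suf taken false dis joint := by
  intro suf
  induction suf with
  | nil =>
    intro pre acc taken dis joint _ _ _ _
    simp [PySem.List.enumerate_nil, pvSelect, pvPart, pvLoopB]
  | cons b suf' ih =>
    intro pre acc taken dis joint hsplit hacc hdis htaken
    have hk : (((pre ++ [b]).length : Int)) = (pre.length : Int) + 1 := by
      simp
    have hget : PySem.List.pyGetD batchsets (pre.length : Int) [] = b := by
      rw [PySem.List.pyGetD_natCast, hsplit]
      simp [List.getD]
    have hlen : dis.length = acc.length := by rw [hdis]; simp
    have hchkeq : ((pvJointWith b (acc.map (fun j => PySem.List.pyGetD batchsets j []))).length == 0)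
        = PySem.Set.isdisjoint taken b := by
      rw [← hdis]; exact pvCheck_iff b dis taken htaken
    rw [PySem.List.enumerate_cons]
    have hcond : ((pvJointWith b (acc.map (fun j => PySem.List.pyGetD batchsets j []))).length == 0)
        = PySem.Set.isdisjoint taken b := hchkeq
    by_cases hchk : PySem.Set.isdisjoint taken b = true
    · -- batch selected
      have hcondT : ((pvJointWith b (acc.map (fun j => PySem.List.pyGetD batchsets j []))).length == 0) = true := by
        rw [hcond]; exact hchk
      have hlen2 : (((dis ++ [b]).length : Int) == m)
          = ((((acc ++ [(pre.length : Int)]).length : Int)) == m) := by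
        have : (dis ++ [b]).length = (acc ++ [(pre.length : Int)]).length := by simp [hlen]
        rw [this]
      have hB : pvLoopB m (b :: suf') taken false dis joint
          = pvLoopB m suf' (PySem.Set.union taken b)
              (((acc ++ [(pre.length : Int)]).length : Int) == m) (dis ++ [b]) joint := by
        rw [pvLoopB]
        simp only [Bool.not_false, Bool.true_and, hchk, hlen2]
        simp
      by_cases hm : ((((acc ++ [(pre.length : Int)]).length : Int)) == m) = true
      · -- break: m reached
        have hsel : pvSelect batchsets m
            (((pre.length : Int), b) :: PySem.List.enumerate suf' ((pre.length : Int) + 1)) acc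
            = acc ++ [(pre.length : Int)] := by
          rw [pvSelect]
          simp only [hcondT, hm]
          simp
        constructor
        · exact ⟨[(pre.length : Int)], by rw [hsel], by intro j hj; simp at hj; omega⟩
        · rw [hsel]
          have hkin : (acc ++ [(pre.length : Int)]).contains (pre.length : Int) = true := by
            simp
          simp only [pvPart, List.foldl_cons, hkin, if_true]
          have hrest : pvPart (acc ++ [(pre.length : Int)])
              (PySem.List.enumerate suf' ((pre.length : Int) + 1)) (dis ++ [b], joint)
              = (dis ++ [b], joint ++ (PySem.List.enumerate suf' ((pre.length : Int) + 1)).map (·.2)) := by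
            apply pvPart_none
            intro p hp
            rw [PySem.List.mem_enumerate_iff] at hp
            rcases hp with ⟨k, hklt, rfl⟩
            simp only [List.contains_eq_mem, decide_eq_false_iff_not, List.mem_append,
              List.mem_singleton]
            rintro (hmem | hmem)
            · have := (hacc _ hmem).2; omega
            · omega
          simp only [pvPart] at hrest
          rw [hrest, PySem.List.map_snd_enumerate, hB, hm, pvLoopB_done]
      · -- continue with the batch selected
        have hmF : ((((acc ++ [(pre.length : Int)]).length : Int)) == m) = false := by
          simpa using hm
        have hstep : pvSelect batchsets m
            (((pre.length : Int), b) :: PySem.List.enumerate suf' ((pre.length : Int) + 1)) acc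
            = pvSelect batchsets m (PySem.List.enumerate suf' ((pre.length : Int) + 1))
                (acc ++ [(pre.length : Int)]) := by
          rw [pvSelect]
          simp only [hcondT, hmF]
          simp
        have ihres := ih (pre ++ [b]) (acc ++ [(pre.length : Int)]) (PySem.Set.union taken b)
          (dis ++ [b]) joint
          (by rw [hsplit]; simp)
          (by intro j hj
              rcases List.mem_append.1 hj with hj | hj
              · have := hacc j hj; omega
              · simp at hj; omega)
          (by rw [hdis]; simp [hget])
          (by intro x
              rw [PySem.Set.mem_union taken b x]
              constructor
              · rintro (hx | hx)
                · rcases (htaken x).1 hx with ⟨o, ho, hxo⟩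
                  exact ⟨o, by simp [ho], hxo⟩
                · exact ⟨b, by simp, hx⟩
              · rintro ⟨o, ho, hxo⟩
                rcases List.mem_append.1 ho with ho | ho
                · exact Or.inl ((htaken x).2 ⟨o, ho, hxo⟩)
                · simp at ho; subst ho; exact Or.inr hxo)
        rw [hk] at ihres
        rcases ihres with ⟨⟨extra, hext, hextge⟩, hpart⟩
        constructor
        · refine ⟨(pre.length : Int) :: extra, ?_, ?_⟩
          · rw [hstep, hext]; simp
          · intro j hj
            rcases List.mem_cons.1 hj with rfl | hj
            · omega
            · have := hextge j hj; omega
        · rw [hstep]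
          have hkin : (pvSelect batchsets m (PySem.List.enumerate suf' ((pre.length : Int) + 1))
              (acc ++ [(pre.length : Int)])).contains (pre.length : Int) = true := by
            rw [hext]; simp
          simp only [pvPart, List.foldl_cons, hkin, if_true]
          rw [hB, hmF]
          simpa [pvPart] using hpart
    · -- batch not selected
      have hchkF : PySem.Set.isdisjoint taken b = false := by
        exact Bool.not_eq_true _ ▸ eq_false_of_ne_true hchk
      have hcondF : ((pvJointWith b (acc.map (fun j => PySem.List.pyGetD batchsets j []))).length == 0) = false := by
        rw [hcond]; exact hchkF
      have hstep : pvSelect batchsets m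
          (((pre.length : Int), b) :: PySem.List.enumerate suf' ((pre.length : Int) + 1)) acc
          = pvSelect batchsets m (PySem.List.enumerate suf' ((pre.length : Int) + 1)) acc := by
        rw [pvSelect]
        simp only [hcondF]
        simp
      have hB : pvLoopB m (b :: suf') taken false dis joint
          = pvLoopB m suf' taken false dis (joint ++ [b]) := by
        rw [pvLoopB]
        simp only [hchkF, Bool.not_false, Bool.true_and]
        simp
      have ihres := ih (pre ++ [b]) acc taken dis (joint ++ [b])
        (by rw [hsplit]; simp)
        (by intro j hj; have := hacc j hj; omega)
        hdis htaken
      rw [hk] at ihres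
      rcases ihres with ⟨⟨extra, hext, hextge⟩, hpart⟩
      constructor
      · refine ⟨extra, by rw [hstep, hext], ?_⟩
        intro j hj; have := hextge j hj; omega
      · rw [hstep]
        have hkout : (pvSelect batchsets m (PySem.List.enumerate suf' ((pre.length : Int) + 1))
            acc).contains (pre.length : Int) = false := by
          rw [hext]
          simp only [List.contains_eq_mem, decide_eq_false_iff_not, List.mem_append]
          rintro (hmem | hmem)
          · have := (hacc _ hmem).2; omega
          · have := hextge _ hmem; omega
        simp only [pvPart, List.foldl_cons, hkout, Bool.false_eq_true, if_false]
        rw [hB]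
        simpa [pvPart] using hpart

-- ===== VERDICT (by name: the statement is the Claim_ definition above) =====
theorem separate_disjoint_batches_spec : Claim_equal_separate_disjoint_batches := by
  intro batchsets m _
  have h := pvMain batchsets m batchsets [] [] PySem.Set.empty [] []
    (by simp) (by simp) (by simp) (by simp [PySem.Set.empty])
  rcases h with ⟨_, hpart⟩
  show separate_disjoint_batches batchsets m = separate_disjoint_batches_alt batchsets m
  simp only [List.length_nil, Nat.cast_zero] at hpart
  unfold separate_disjoint_batches separate_disjoint_batches_alt
  simpa [pvPart, PySem.List.enumerate] using hpart
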